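-- pv_equiv track=rewrite | github.com/alexrudloff/noodle | modules/scripting/module.py | token_spans
-- ===== SOURCE A (Python) =====
-- def token_spans(text):
--     spans = []
--     start = None
--     for index, ch in enumerate(text):
--         if ch.isspace():
--             if start is not None:
--                 spans.append((start, text[start:index]))
--                 start = None
--         elif start is None:
--             start = index
--     if start is not None:
--         spans.append((start, text[start:]))
--     return spans
-- ===== SOURCE B (Python) =====
-- from itertools import groupby
--
--
-- def token_spans(text):
--     spans = []
--     index = 0
--     for is_space, group in groupby(text, key=str.isspace):
--         chunk = ''.join(group)
--         if not is_space:
--             spans.append((index, chunk))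
--         index += len(chunk)
--     return spans
-- ===== Notes on version B (the rewrite author's own statement) =====
-- stated objective: alternative
-- what changed: Replaced A's per-character start-sentinel state machine with an itertools.groupby traversal over maximal runs of equal whitespace-status, emitting each non-whitespace run with its running start index.
import Mathlib
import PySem

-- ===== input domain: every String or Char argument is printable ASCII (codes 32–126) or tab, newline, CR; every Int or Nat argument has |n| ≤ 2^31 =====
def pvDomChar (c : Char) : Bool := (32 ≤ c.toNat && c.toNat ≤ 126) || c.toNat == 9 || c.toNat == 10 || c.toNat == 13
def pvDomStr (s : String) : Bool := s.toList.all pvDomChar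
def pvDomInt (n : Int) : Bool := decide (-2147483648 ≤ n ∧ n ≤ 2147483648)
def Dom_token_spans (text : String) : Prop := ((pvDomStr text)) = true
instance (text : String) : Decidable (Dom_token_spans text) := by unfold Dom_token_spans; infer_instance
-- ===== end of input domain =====

-- B replaces A's per-character start-sentinel state machine by an itertools.groupby-style
-- traversal over maximal runs of equal whitespace-status (objective: alternative decomposition).

-- ===== PORT A =====
-- step of A's for-loop: state = (spans, start)
def tsStep (text : String) (st : List (Int × String) × Option Int) (p : Int × Char) :
    List (Int × String) × Option Int :=
  if PySem.Chars.isspace p.2 then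
    match st.2 with
    | some s => (st.1 ++ [(s, PySem.Str.slice text (some s) (some p.1))], none)
    | none => st
  else
    match st.2 with
    | none => (st.1, some p.1)
    | some _ => st

-- the trailing 'if start is not None' flush
def tsFinish (text : String) (st : List (Int × String) × Option Int) : List (Int × String) :=
  match st.2 with
  | some s => st.1 ++ [(s, PySem.Str.slice text (some s) none)]
  | none => st.1

def token_spans (text : String) : List (Int × String) :=
  tsFinish text ((PySem.List.enumerate text.toList 0).foldl (tsStep text) ([], none))

-- ===== PORT B =====
-- groupby: peel off one maximal run of equal whitespace-status at a time
def tsRuns (i : Nat) (cs : List Char) : List (Int × String) :=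
  match cs with
  | [] => []
  | c :: rest =>
    let p := fun x => PySem.Chars.isspace x == PySem.Chars.isspace c
    let run := c :: rest.takeWhile p
    let tail := tsRuns (i + run.length) (rest.dropWhile p)
    if PySem.Chars.isspace c then tail else ((i : Int), String.ofList run) :: tail
termination_by cs.length
decreasing_by
  simpa using Nat.lt_succ_of_le (List.length_dropWhile_le _ _)

def token_spans_alt (text : String) : List (Int × String) :=
  tsRuns 0 text.toList

-- ===== PRECONDITION & SPEC =====
def Spec_token_spans (text : String) (out : List (Int × String)) : Prop := out = token_spans_alt text
instance (text : String) (out : List (Int × String)) : Decidable (Spec_token_spans text out) := by unfold Spec_token_spans; infer_instance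

-- ===== CLAIM (what is proved, stated in full; the proofs are below) =====
def Claim_equal_token_spans : Prop := ∀ (text : String), Dom_token_spans text → Spec_token_spans text (token_spans text)

-- ===== LEMMAS AND PROOFS =====

-- skipping a whitespace run one char at a time
theorem tsRuns_space (i : Nat) (c : Char) (cs : List Char)
    (hc : PySem.Chars.isspace c = true) :
    tsRuns i (c :: cs) = tsRuns (i + 1) cs := by
  have hp : (fun x => PySem.Chars.isspace x == PySem.Chars.isspace c) =
      (fun x => PySem.Chars.isspace x) := by
    funext x; rw [hc]; cases PySem.Chars.isspace x <;> rfl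
  conv_lhs => rw [tsRuns]
  rw [hp]
  simp only [hc, if_true, List.length_cons]
  cases cs with
  | nil => simp [tsRuns]
  | cons d cs' =>
    by_cases hd : PySem.Chars.isspace d = true
    · have hp' : (fun x => PySem.Chars.isspace x == PySem.Chars.isspace d) =
          (fun x => PySem.Chars.isspace x) := by
        funext x; rw [hd]; cases PySem.Chars.isspace x <;> rfl
      conv_rhs => rw [tsRuns]
      rw [hp']
      simp only [hd, if_true, List.takeWhile_cons, List.dropWhile_cons, List.length_cons]
      congr 1
      omega
    · have hd' : PySem.Chars.isspace d = false := by simpa using hd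
      simp [hd']

-- unfolding at the head of a non-whitespace run
theorem tsRuns_nonspace (i : Nat) (c : Char) (cs : List Char)
    (hc : PySem.Chars.isspace c = false) :
    tsRuns i (c :: cs) =
      ((i : Int), String.ofList (c :: cs.takeWhile (fun x => !PySem.Chars.isspace x))) ::
        tsRuns (i + (1 + (cs.takeWhile (fun x => !PySem.Chars.isspace x)).length))
          (cs.dropWhile (fun x => !PySem.Chars.isspace x)) := by
  have hp : (fun x => PySem.Chars.isspace x == PySem.Chars.isspace c) =
      (fun x => !PySem.Chars.isspace x) := by
    funext x; rw [hc]; cases PySem.Chars.isspace x <;> rfl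
  rw [tsRuns, hp]
  simp only [hc, Bool.false_eq_true, if_false, List.length_cons]
  congr 2
  omega

theorem takeWhile_append_all {α : Type} (p : α → Bool) (q r : List α)
    (hq : ∀ c ∈ q, p c = true) : (q ++ r).takeWhile p = q ++ r.takeWhile p := by
  induction q with
  | nil => simp
  | cons a q ih =>
    simp only [List.cons_append, List.takeWhile_cons, hq a (by simp)]
    simp [ih fun c hc => hq c (by simp [hc])]

theorem dropWhile_append_all {α : Type} (p : α → Bool) (q r : List α)
    (hq : ∀ c ∈ q, p c = true) : (q ++ r).dropWhile p = r.dropWhile p := by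
  induction q with
  | nil => simp
  | cons a q ih =>
    simp only [List.cons_append, List.dropWhile_cons, hq a (by simp)]
    simp [ih fun c hc => hq c (by simp [hc])]

-- a maximal non-whitespace run is emitted in one piece
theorem tsRuns_run (s : Nat) (q r : List Char) (hq : q ≠ [])
    (hall : ∀ c ∈ q, PySem.Chars.isspace c = false)
    (hr : r.takeWhile (fun x => !PySem.Chars.isspace x) = []) :
    tsRuns s (q ++ r) = ((s : Int), String.ofList q) :: tsRuns (s + q.length) r := by
  cases q with
  | nil => exact absurd rfl hq
  | cons h q' =>
    have hh : PySem.Chars.isspace h = false := hall h (by simp)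
    have hq' : ∀ c ∈ q', (fun x => !PySem.Chars.isspace x) c = true := by
      intro c hc; simp [hall c (by simp [hc])]
    rw [List.cons_append, tsRuns_nonspace _ _ _ hh,
      takeWhile_append_all _ _ _ hq', dropWhile_append_all _ _ _ hq', hr]
    have hdw : r.dropWhile (fun x => !PySem.Chars.isspace x) = r := by
      cases r with
      | nil => rfl
      | cons a r' =>
        simp only [List.takeWhile_cons] at hr
        cases ha : (!PySem.Chars.isspace a) with
        | false => simp [ha]
        | true => simp [ha] at hr
    rw [hdw]
    simp [Nat.add_comm]

-- the main invariant: processing the suffix cs (positions from pref.length on) with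
-- start = none gives tsRuns from the current position; with start = some s (s inside
-- pref, chars s .. pref.length-1 non-whitespace) it gives tsRuns from position s.
theorem ts_main (text : String) : ∀ (cs pref : List Char),
    text.toList = pref ++ cs → ∀ spans : List (Int × String),
    (tsFinish text ((PySem.List.enumerate cs (pref.length : Int)).foldl (tsStep text) (spans, none)) =
        spans ++ tsRuns pref.length cs)
    ∧ (∀ s : Nat, s < pref.length → (∀ c ∈ pref.drop s, PySem.Chars.isspace c = false) →
        tsFinish text ((PySem.List.enumerate cs (pref.length : Int)).foldl (tsStep text) (spans, some (s : Int))) =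
          spans ++ tsRuns s (pref.drop s ++ cs)) := by
  intro cs
  induction cs with
  | nil =>
    intro pref H spans
    constructor
    · simp [tsFinish, PySem.List.enumerate, tsRuns]
    · intro s hs hall
      have hdropnil : pref.drop s ≠ [] := by
        intro h; have := List.length_drop (l := pref) (i := s); rw [h] at this; simp at this; omega
      simp only [PySem.List.enumerate, List.foldl_nil, tsFinish, List.append_nil]
      rw [PySem.Str.slice]
      have htl : PySem.Chars.slice text.toList (some (s : Int)) none = pref.drop s := by
        simp [PySem.Chars.slice_eq_listSlice, PySem.List.slice_from_natCast, H]
      rw [htl]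
      have hrun := tsRuns_run s (pref.drop s) [] hdropnil hall (by simp)
      rw [List.append_nil] at hrun
      rw [hrun]
      simp [tsRuns]
  | cons c cs' ih =>
    intro pref H spans
    have H' : text.toList = (pref ++ [c]) ++ cs' := by simpa using H
    have hlen : ((pref.length : Int) + 1) = (((pref ++ [c]).length : Nat) : Int) := by
      simp
    constructor
    · rw [PySem.List.enumerate_cons, List.foldl_cons]
      by_cases hc : PySem.Chars.isspace c
      · have hstep : tsStep text (spans, none) ((pref.length : Int), c) = (spans, none) := by
          simp [tsStep, hc]
        rw [hstep, hlen, (ih (pref ++ [c]) H' spans).1, tsRuns_space _ _ _ hc]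
        simp
      · have hstep : tsStep text (spans, none) ((pref.length : Int), c) =
            (spans, some (pref.length : Int)) := by
          simp [tsStep, hc]
        rw [hstep, hlen]
        have h2 := (ih (pref ++ [c]) H' spans).2 pref.length (by simp)
          (by intro x hx; simp at hx; simpa [hx] using hc)
        rw [h2]
        simp
    · intro s hs hall
      rw [PySem.List.enumerate_cons, List.foldl_cons]
      have hqlen : (pref.drop s).length = pref.length - s := by simp
      have hqne : pref.drop s ≠ [] := by
        intro h; rw [h] at hqlen; simp at hqlen; omega
      by_cases hc : PySem.Chars.isspace c
      · have hstep : tsStep text (spans, some (s : Int)) ((pref.length : Int), c) =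
            (spans ++ [((s : Int), PySem.Str.slice text (some (s : Int)) (some (pref.length : Int)))], none) := by
          simp [tsStep, hc]
        rw [hstep, hlen, (ih (pref ++ [c]) H' _).1]
        have hslice : PySem.Str.slice text (some (s : Int)) (some (pref.length : Int)) =
            String.ofList (pref.drop s) := by
          rw [PySem.Str.slice]
          congr 1
          rw [PySem.Chars.slice_eq_listSlice, PySem.List.slice_natCast, H]
          rw [List.drop_append_of_le_length (by omega)]
          rw [List.take_append_of_le_length (by omega)]
          exact List.take_of_length_le (by simp)
        rw [hslice, tsRuns_run s (pref.drop s) (c :: cs') hqne hall (by simp [hc]),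
          hqlen, tsRuns_space _ _ _ hc]
        have : s + (pref.length - s) = pref.length := by omega
        rw [this]
        simp
      · have hstep : tsStep text (spans, some (s : Int)) ((pref.length : Int), c) =
            (spans, some (s : Int)) := by
          simp [tsStep, hc]
        rw [hstep, hlen]
        have h2 := (ih (pref ++ [c]) H' spans).2 s (by simp; omega)
          (by
            intro x hx
            rw [List.drop_append_of_le_length (by omega)] at hx
            simp at hx
            rcases hx with hx | hx
            · exact hall x hx
            · simpa [hx] using hc)
        rw [h2, List.drop_append_of_le_length (by omega)]
        simp
-- ===== VERDICT (by name: the statement is the Claim_ definition above) =====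
theorem token_spans_spec : Claim_equal_token_spans := by
  intro text _
  unfold Spec_token_spans token_spans token_spans_alt
  have := (ts_main text text.toList [] (by simp) []).1
  simpa using this
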